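-- pv_equiv track=rewrite | github.com/liuchunbest/DSE | extract_feature.py | getCollocationsFromSentence_new
-- ===== SOURCE A (Python) =====
-- def getCollocationsFromSentence_new(sentence_list, keyword):
--     #首先确定关键词在句子中的位置
--     threshold_distance=5
--
--     index_list=[]
--     k=0
--     for word in sentence_list:
--         if word == keyword:
--             index_list.append(k)
--         k+=1
--
--     all_feature_list=[]
--     for index in index_list:
--         #提取关键词前面的词所组成的特征
--         star=index-threshold_distance+1
--         if star<0:
--             star=0
--         for i in range(star,index):
--             new_feature=[]
--             new_feature.append(sentence_list[i])
--             new_feature.append(keyword)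
--             all_feature_list.append(new_feature)
--         #提取关键词后面的词所组成的特征
--         end=index+threshold_distance-1
--         if end>len(sentence_list):
--             end=len(sentence_list)
--         for i in range(index+1,end):
--             new_feature=[]
--             new_feature.append(keyword)
--             new_feature.append(sentence_list[i])
--             all_feature_list.append(new_feature)
--     result_feature_list,feature_with_sort_list=filterCollocations(all_feature_list)
--     return result_feature_list,feature_with_sort_list
--
-- def filterCollocations(all_feature_list):
--     new_feature_list=[]
--     feature_with_sort_list=[]
--     for feature in all_feature_list:
--         feature_set=set(feature)
--         if feature_set not in new_feature_list:
--             new_feature_list.append(feature_set)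
--             feature_with_sort_list.append(feature)
--     return new_feature_list,feature_with_sort_list
-- ===== SOURCE B (Python) =====
-- def getCollocationsFromSentence_new(sentence_list, keyword):
--     # One fused pass: walk keyword positions, generate window pairs via a single
--     # signed-offset loop, dedup on the fly with a hash set of unordered keys.
--     n = len(sentence_list)
--     seen = set()
--     result_feature_list = []
--     feature_with_sort_list = []
--     for index, word in enumerate(sentence_list):
--         if word != keyword:
--             continue
--         for d in range(-4, 4):
--             if d == 0:
--                 continue
--             i = index + d
--             if i < 0 or i >= n:
--                 continue
--             w = sentence_list[i]
--             pair = [w, keyword] if d < 0 else [keyword, w]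
--             key = (w, keyword) if w <= keyword else (keyword, w)
--             if key not in seen:
--                 seen.add(key)
--                 result_feature_list.append(set(pair))
--                 feature_with_sort_list.append(pair)
--     return result_feature_list, feature_with_sort_list
-- ===== Notes on version B (the rewrite author's own statement) =====
-- stated objective: alternative
-- what changed: Replaces A's build-then-filter (materialize all window pairs, then dedup with a quadratic list scan of sets) by one fused pass over keyword positions with a single signed-offset window loop and on-the-fly dedup via a hash set of unordered (min,max) keys.
import Mathlib
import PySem

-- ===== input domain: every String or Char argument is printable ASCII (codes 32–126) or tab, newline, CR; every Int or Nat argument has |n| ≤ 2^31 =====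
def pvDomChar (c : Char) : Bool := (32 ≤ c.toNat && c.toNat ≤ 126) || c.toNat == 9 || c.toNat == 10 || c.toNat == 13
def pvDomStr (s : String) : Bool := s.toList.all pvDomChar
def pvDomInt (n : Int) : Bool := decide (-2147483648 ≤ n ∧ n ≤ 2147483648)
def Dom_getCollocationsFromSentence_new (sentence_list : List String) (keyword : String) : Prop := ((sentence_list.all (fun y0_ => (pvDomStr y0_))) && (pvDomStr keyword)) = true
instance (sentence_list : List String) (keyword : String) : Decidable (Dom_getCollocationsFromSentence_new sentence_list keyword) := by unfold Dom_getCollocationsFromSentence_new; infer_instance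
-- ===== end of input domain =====

-- B replaces A's build-then-filter by one fused pass with on-the-fly dedup keyed by the unordered pair (alternative decomposition).

-- ===== PORT A =====
-- helper of A: the dedup step of filterCollocations's loop (Python 'set(feature)' and 'feature_set not in new_feature_list')
def dedupStepA (s : List (List String) × List (List String)) (feature : List String) :
    List (List String) × List (List String) :=
  let feature_set := PySem.Set.ofList feature
  if s.1.any (fun e => PySem.Set.equal e feature_set) then s
  else (s.1 ++ [feature_set], s.2 ++ [feature])

def filterCollocations (all_feature_list : List (List String)) :
    List (List String) × List (List String) :=
  all_feature_list.foldl dedupStepA ([], [])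

def getCollocationsFromSentence_new (sentence_list : List String) (keyword : String) :
    List (List String) × List (List String) :=
  let threshold_distance : Int := 5
  let ik := sentence_list.foldl
    (fun (s : List Int × Int) word =>
      (if word == keyword then s.1 ++ [s.2] else s.1, s.2 + 1)) ([], 0)
  let index_list := ik.1
  let all_feature_list := index_list.foldl
    (fun acc index =>
      let star := index - threshold_distance + 1
      let star := if star < 0 then 0 else star
      let acc := (PySem.List.pyRange star index 1).foldl
        (fun acc i => acc ++ [[PySem.List.pyGetD sentence_list i "", keyword]]) acc
      let e := index + threshold_distance - 1
      let e := if e > (sentence_list.length : Int) then (sentence_list.length : Int) else e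
      (PySem.List.pyRange (index + 1) e 1).foldl
        (fun acc i => acc ++ [[keyword, PySem.List.pyGetD sentence_list i ""]]) acc) []
  filterCollocations all_feature_list

-- ===== PORT B =====
-- helper of B: the body of the 'for d in range(-4, 4)' loop of Source B
def offStepB (sentence_list : List String) (keyword : String) (n index : Int)
    (t : PySem.Set (String × String) × List (List String) × List (List String)) (d : Int) :
    PySem.Set (String × String) × List (List String) × List (List String) :=
  if d == 0 then t
  else
    let i := index + d
    if i < 0 || n ≤ i then t
    else
      let w := PySem.List.pyGetD sentence_list i ""
      let pair := if d < 0 then [w, keyword] else [keyword, w]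
      let key := if w ≤ keyword then (w, keyword) else (keyword, w)
      if t.1.contains key then t
      else (t.1.add key, t.2.1 ++ [PySem.Set.ofList pair], t.2.2 ++ [pair])

def getCollocationsFromSentence_new_alt (sentence_list : List String) (keyword : String) :
    List (List String) × List (List String) :=
  let n : Int := sentence_list.length
  ((PySem.List.enumerate sentence_list 0).foldl
    (fun t iw =>
      if iw.2 == keyword then
        (PySem.List.pyRange (-4) 4 1).foldl (offStepB sentence_list keyword n iw.1) t
      else t)
    (PySem.Set.empty, [], [])).2

-- ===== PRECONDITION & SPEC =====
def Spec_getCollocationsFromSentence_new (sentence_list : List String) (keyword : String) (out : List (List String) × List (List String)) : Prop := out = getCollocationsFromSentence_new_alt sentence_list keyword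
instance (sentence_list : List String) (keyword : String) (out : List (List String) × List (List String)) : Decidable (Spec_getCollocationsFromSentence_new sentence_list keyword out) := by unfold Spec_getCollocationsFromSentence_new; infer_instance

-- ===== CLAIM (what is proved, stated in full; the proofs are below) =====
def Claim_equal_getCollocationsFromSentence_new : Prop := ∀ (sentence_list : List String) (keyword : String), Dom_getCollocationsFromSentence_new sentence_list keyword → Spec_getCollocationsFromSentence_new sentence_list keyword (getCollocationsFromSentence_new sentence_list keyword)

-- ===== LEMMAS AND PROOFS =====

-- the window pair chunk one keyword position contributes, as ordered tuples
def chunk (xs : List String) (kw : String) (index : Int) : List (String × String) :=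
  let star := if index - 5 + 1 < 0 then 0 else index - 5 + 1
  let e := if index + 5 - 1 > (xs.length : Int) then (xs.length : Int) else index + 5 - 1
  ((PySem.List.pyRange star index 1).map fun i => (PySem.List.pyGetD xs i "", kw)) ++
  ((PySem.List.pyRange (index + 1) e 1).map fun i => (kw, PySem.List.pyGetD xs i ""))

-- the fused dedup-insert step on a tuple pair
def bstep (t : PySem.Set (String × String) × List (List String) × List (List String))
    (p : String × String) :
    PySem.Set (String × String) × List (List String) × List (List String) :=
  let key := if p.1 ≤ p.2 then p else (p.2, p.1)
  if t.1.contains key then t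
  else (t.1.add key, t.2.1 ++ [PySem.Set.ofList [p.1, p.2]], t.2.2 ++ [[p.1, p.2]])

-- generic: a guarded fold is a fold over the filtered, mapped list
theorem foldl_guard {α β σ : Type} (l : List α) (p : α → Bool) (f : α → β)
    (g : σ → β → σ) (s : σ) :
    l.foldl (fun s x => if p x then g s (f x) else s) s = ((l.filter p).map f).foldl g s := by
  induction l generalizing s with
  | nil => rfl
  | cons a l ih =>
    by_cases h : p a = true <;> simp [List.foldl_cons, List.filter_cons, h, ih]

theorem foldl_flatMap {α β σ : Type} (l : List α) (h : α → List β) (g : σ → β → σ) (s : σ) :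
    (l.flatMap h).foldl g s = l.foldl (fun s x => (h x).foldl g s) s := by
  induction l generalizing s with
  | nil => rfl
  | cons a l ih => simp [List.flatMap_cons, List.foldl_append, ih]

-- A's index_list loop
theorem indexList_spec (kw : String) (xs : List String) :
    ∀ (l : List Int) (k : Int),
    xs.foldl (fun (s : List Int × Int) word =>
      (if word == kw then s.1 ++ [s.2] else s.1, s.2 + 1)) (l, k)
    = (l ++ (((PySem.List.enumerate xs k).filter (fun p => p.2 == kw)).map (·.1)),
        k + xs.length) := by
  induction xs with
  | nil => intro l k; simp [PySem.List.enumerate_nil]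
  | cons a xs ih =>
    intro l k
    rw [List.foldl_cons, PySem.List.enumerate_cons, List.filter_cons]
    by_cases h : (a == kw) = true
    · simp only [h, if_true]
      rw [ih]
      refine Prod.ext ?_ ?_
      · simp
      · simp; push_cast; ring
    · simp only [h, Bool.false_eq_true, if_false]
      rw [ih]
      refine Prod.ext ?_ ?_
      · simp
      · simp; push_cast; ring

-- shift of a range under map (+ index)
theorem map_add_pyRange (index a b : Int) :
    (PySem.List.pyRange a b 1).map (fun d => index + d)
      = PySem.List.pyRange (index + a) (index + b) 1 := by
  rw [PySem.List.pyRange_one, PySem.List.pyRange_one]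
  simp only [List.map_map]
  have : index + b - (index + a) = b - a := by ring
  rw [this]
  apply List.map_congr_left
  intro k _
  simp [Function.comp]
  ring

-- before-window: filtered shifted offsets = A's (star, index) range
theorem filt_before (index : Int) (h : 0 ≤ index) :
    ((PySem.List.pyRange (-4) 0 1).filter (fun d => decide (0 ≤ index + d))).map
        (fun d => index + d)
      = PySem.List.pyRange (if index - 5 + 1 < 0 then 0 else index - 5 + 1) index 1 := by
  by_cases h4 : 4 ≤ index
  · have hfilter : (PySem.List.pyRange (-4) 0 1).filter (fun d => decide (0 ≤ index + d))
        = PySem.List.pyRange (-4) 0 1 := by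
      apply List.filter_eq_self.mpr
      intro d hd
      have := (PySem.List.mem_pyRange_one).1 hd
      simp only [decide_eq_true_eq]
      omega
    rw [hfilter, map_add_pyRange]
    have : index - 5 + 1 < 0 → False := by omega
    simp only [if_neg this]
    congr 1 <;> omega
  · have h3 : index < 4 := by omega
    interval_cases index <;> decide

-- after-window: filtered shifted offsets = A's (index+1, end) range
theorem filt_after (index n : Int) (h0 : 0 ≤ index) (h : index < n) :
    ((PySem.List.pyRange 1 4 1).filter (fun d => decide (index + d < n))).map
        (fun d => index + d)
      = PySem.List.pyRange (index + 1) (if index + 5 - 1 > n then n else index + 5 - 1) 1 := by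
  by_cases h4 : index + 4 ≤ n
  · have hfilter : (PySem.List.pyRange 1 4 1).filter (fun d => decide (index + d < n))
        = PySem.List.pyRange 1 4 1 := by
      apply List.filter_eq_self.mpr
      intro d hd
      have := (PySem.List.mem_pyRange_one).1 hd
      simp only [decide_eq_true_eq]
      omega
    rw [hfilter, map_add_pyRange]
    have : index + 5 - 1 > n → False := by omega
    simp only [if_neg this]
    congr 1
    omega
  · obtain ⟨m, hm1, hm3, hnm⟩ : ∃ m, 1 ≤ m ∧ m ≤ 3 ∧ n = index + m :=
      ⟨n - index, by omega, by omega, by omega⟩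
    have hpred : ((PySem.List.pyRange 1 4 1).filter (fun d => decide (index + d < n)))
        = (PySem.List.pyRange 1 4 1).filter (fun d => decide (d < m)) := by
      apply List.filter_congr
      intro d _
      simp only [decide_eq_decide]
      omega
    rw [hpred]
    have hgt : index + 5 - 1 > n := by omega
    rw [if_pos hgt]
    subst hnm
    have hm' : m = 1 ∨ m = 2 ∨ m = 3 := by omega
    rcases hm' with rfl | rfl | rfl <;>
      simp [PySem.List.pyRange_one, List.range_succ] <;> ring_nf

-- the unordered key commutes
theorem key_comm (x y : String) :
    (if x ≤ y then (x, y) else (y, x)) = (if y ≤ x then (y, x) else (x, y)) := by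
  rcases le_total x y with h | h
  · by_cases h2 : y ≤ x
    · have := le_antisymm h h2; subst this; simp
    · simp [h, h2]
  · by_cases h2 : x ≤ y
    · have := le_antisymm h2 h; subst this; simp
    · simp [h, h2]

-- the unordered key determines set-equality of the two-element feature lists
theorem key_eq_equal (a b x y : String) :
    ((if x ≤ y then (x, y) else (y, x)) == (if a ≤ b then (a, b) else (b, a)))
      = PySem.Set.equal (PySem.Set.ofList [a, b]) (PySem.Set.ofList [x, y]) := by
  rw [Bool.eq_iff_iff]
  simp only [beq_iff_eq]
  rw [PySem.Set.equal_iff]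
  simp only [PySem.Set.mem_ofList, List.mem_cons, List.not_mem_nil, or_false]
  constructor
  · intro h z
    split_ifs at h <;> (rw [Prod.ext_iff] at h; obtain ⟨h1, h2⟩ := h; subst h1; subst h2; tauto)
  · intro h
    have ha := (h a).1 (Or.inl rfl)
    have hb := (h b).1 (Or.inr rfl)
    have hx := (h x).2 (Or.inl rfl)
    have hy := (h y).2 (Or.inr rfl)
    rcases ha with h1 | h1 <;> rcases hb with h2 | h2
    · have h3 : y = x := by
        rcases hy with h3 | h3
        · rw [h3, h1]
        · rw [h3, h2]
      rw [h1, h2, h3]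
    · rw [h1, h2]
    · rw [h1, h2]; exact key_comm _ _
    · have h3 : x = y := by
        rcases hx with h3 | h3
        · rw [h3, h1]
        · rw [h3, h2]
      rw [h1, h2, h3]

-- fusing generation with dedup: B's fold tracks A's filter pass
theorem fuse (L : List (String × String)) :
    ∀ (S : PySem.Set (String × String)) (s : List (List String) × List (List String)),
    (∀ x y : String,
        S.contains (if x ≤ y then (x, y) else (y, x))
          = s.1.any (fun e => PySem.Set.equal e (PySem.Set.ofList [x, y]))) →
    (L.foldl bstep (S, s.1, s.2)).2 = L.foldl (fun s p => dedupStepA s [p.1, p.2]) s := by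
  induction L with
  | nil => intro S s _; rfl
  | cons p L ih =>
    intro S s hinv
    have hkey : (fun t : String × String => if t.1 ≤ t.2 then t else (t.2, t.1)) p
        = (if p.1 ≤ p.2 then (p.1, p.2) else (p.2, p.1)) := by
      by_cases h : p.1 ≤ p.2 <;> simp [h]
    have hmem := hinv p.1 p.2
    simp only [List.foldl_cons, bstep, dedupStepA]
    rw [show (if p.1 ≤ p.2 then p else (p.2, p.1))
          = (if p.1 ≤ p.2 then (p.1, p.2) else (p.2, p.1)) from by
        by_cases h : p.1 ≤ p.2 <;> simp [h]]
    rw [hmem]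
    by_cases hc : (s.1.any (fun e => PySem.Set.equal e (PySem.Set.ofList [p.1, p.2]))) = true
    · simp only [hc, if_true]
      exact ih S s hinv
    · simp only [hc, Bool.false_eq_true, if_false]
      have := ih (S.add (if p.1 ≤ p.2 then (p.1, p.2) else (p.2, p.1)))
        (s.1 ++ [PySem.Set.ofList [p.1, p.2]], s.2 ++ [[p.1, p.2]]) (by
          intro x y
          have hadd : (PySem.Set.add S (if p.1 ≤ p.2 then (p.1, p.2) else (p.2, p.1))).contains
              (if x ≤ y then (x, y) else (y, x))
              = (S.contains (if x ≤ y then (x, y) else (y, x))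
                 || ((if x ≤ y then (x, y) else (y, x))
                      == (if p.1 ≤ p.2 then (p.1, p.2) else (p.2, p.1)))) := by
            rw [Bool.eq_iff_iff]
            simp only [Bool.or_eq_true, beq_iff_eq]
            constructor
            · intro hmm
              have := (PySem.Set.contains_iff _ _).1 hmm
              rw [PySem.Set.mem_add] at this
              rcases this with hthis | hthis
              · exact Or.inl ((PySem.Set.contains_iff _ _).2 hthis)
              · exact Or.inr hthis
            · intro hmm
              apply (PySem.Set.contains_iff _ _).2
              rw [PySem.Set.mem_add]
              rcases hmm with hmm | hmm
              · exact Or.inl ((PySem.Set.contains_iff _ _).1 hmm)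
              · exact Or.inr hmm
          rw [hadd, hinv x y, key_eq_equal]
          simp [List.any_append])
      simpa using this

-- one keyword position: B's offset loop = fold of bstep over the chunk
theorem offsets_chunk (xs : List String) (kw : String) (index : Int)
    (h0 : 0 ≤ index) (hn : index < (xs.length : Int)) :
    ∀ t, (PySem.List.pyRange (-4) 4 1).foldl (offStepB xs kw (xs.length : Int) index) t
      = (chunk xs kw index).foldl bstep t := by
  intro t
  have hsplit : PySem.List.pyRange (-4) 4 1
      = PySem.List.pyRange (-4) 0 1 ++ [0] ++ PySem.List.pyRange 1 4 1 := by decide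
  rw [hsplit, List.foldl_append, List.foldl_append]
  -- before part
  have hbefore : ∀ t, (PySem.List.pyRange (-4) 0 1).foldl (offStepB xs kw (xs.length : Int) index) t
      = (((PySem.List.pyRange (-4) 0 1).filter (fun d => decide (0 ≤ index + d))).map
          (fun d => (PySem.List.pyGetD xs (index + d) "", kw))).foldl bstep t := by
    intro t
    rw [← foldl_guard]
    apply PySem.List.foldl_congr_mem
    intro acc d hd
    have hdmem := (PySem.List.mem_pyRange_one).1 hd
    simp only [offStepB, bstep]
    have hd0 : (d == 0) = false := by simp; omega
    rw [hd0]
    simp only [Bool.false_eq_true, if_false]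
    by_cases hge : (0 ≤ index + d)
    · have : (index + d < 0 || (xs.length : Int) ≤ index + d) = false := by
        simp; omega
      rw [this]
      simp only [Bool.false_eq_true, if_false, hge, decide_true, if_true]
      have hdneg : d < 0 := by omega
      simp [hdneg]
    · have : (index + d < 0 || (xs.length : Int) ≤ index + d) = true := by
        simp; omega
      rw [this]
      simp [hge]
  -- after part
  have hafter : ∀ t, (PySem.List.pyRange 1 4 1).foldl (offStepB xs kw (xs.length : Int) index) t
      = (((PySem.List.pyRange 1 4 1).filter (fun d => decide (index + d < (xs.length : Int)))).map
          (fun d => (kw, PySem.List.pyGetD xs (index + d) ""))).foldl bstep t := by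
    intro t
    rw [← foldl_guard]
    apply PySem.List.foldl_congr_mem
    intro acc d hd
    have hdmem := (PySem.List.mem_pyRange_one).1 hd
    simp only [offStepB, bstep]
    have hd0 : (d == 0) = false := by simp; omega
    rw [hd0]
    simp only [Bool.false_eq_true, if_false]
    by_cases hlt : (index + d < (xs.length : Int))
    · have : (index + d < 0 || (xs.length : Int) ≤ index + d) = false := by
        simp; omega
      rw [this]
      simp only [Bool.false_eq_true, if_false, hlt, decide_true, if_true]
      have hdpos : ¬ (d < 0) := by omega
      simp only [hdpos, if_false]
      set w := PySem.List.pyGetD xs (index + d) "" with hw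
      have hk : (if w ≤ kw then (w, kw) else (kw, w)) = (if kw ≤ w then (kw, w) else (w, kw)) :=
        key_comm w kw
      rw [hk]
    · have : (index + d < 0 || (xs.length : Int) ≤ index + d) = true := by
        simp; omega
      rw [this]
      simp [hlt]
  rw [hbefore, hafter]
  have hmid : List.foldl (offStepB xs kw (xs.length : Int) index)
      ((((PySem.List.pyRange (-4) 0 1).filter (fun d => decide (0 ≤ index + d))).map
          (fun d => (PySem.List.pyGetD xs (index + d) "", kw))).foldl bstep t) [0]
      = (((PySem.List.pyRange (-4) 0 1).filter (fun d => decide (0 ≤ index + d))).map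
          (fun d => (PySem.List.pyGetD xs (index + d) "", kw))).foldl bstep t := by
    simp [offStepB]
  rw [hmid]
  simp only [chunk, List.foldl_append]
  have hmap1 : ((PySem.List.pyRange (-4) 0 1).filter (fun d => decide (0 ≤ index + d))).map
        (fun d => (PySem.List.pyGetD xs (index + d) "", kw))
      = ((((PySem.List.pyRange (-4) 0 1).filter (fun d => decide (0 ≤ index + d))).map
          (fun d => index + d)).map (fun i => (PySem.List.pyGetD xs i "", kw))) := by
    rw [List.map_map]; rfl
  have hmap2 : ((PySem.List.pyRange 1 4 1).filter
        (fun d => decide (index + d < (xs.length : Int)))).map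
        (fun d => (kw, PySem.List.pyGetD xs (index + d) ""))
      = ((((PySem.List.pyRange 1 4 1).filter
          (fun d => decide (index + d < (xs.length : Int)))).map
          (fun d => index + d)).map (fun i => (kw, PySem.List.pyGetD xs i ""))) := by
    rw [List.map_map]; rfl
  rw [hmap1, hmap2, filt_before index h0, filt_after index _ h0 hn]

-- A's all_feature_list loop builds the flatMap of chunks
theorem allfeat_eq (xs : List String) (kw : String) (l : List Int) :
    l.foldl (fun acc index =>
      (PySem.List.pyRange (index + 1)
          (if index + 5 - 1 > (xs.length : Int) then (xs.length : Int) else index + 5 - 1) 1).foldl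
        (fun acc i => acc ++ [[kw, PySem.List.pyGetD xs i ""]])
        ((PySem.List.pyRange (if index - 5 + 1 < 0 then 0 else index - 5 + 1) index 1).foldl
          (fun acc i => acc ++ [[PySem.List.pyGetD xs i "", kw]]) acc)) []
    = l.flatMap (fun i => (chunk xs kw i).map (fun p => [p.1, p.2])) := by
  have hbody : (fun (acc : List (List String)) (index : Int) =>
      (PySem.List.pyRange (index + 1)
          (if index + 5 - 1 > (xs.length : Int) then (xs.length : Int) else index + 5 - 1) 1).foldl
        (fun acc i => acc ++ [[kw, PySem.List.pyGetD xs i ""]])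
        ((PySem.List.pyRange (if index - 5 + 1 < 0 then 0 else index - 5 + 1) index 1).foldl
          (fun acc i => acc ++ [[PySem.List.pyGetD xs i "", kw]]) acc))
      = (fun acc index => acc ++ (chunk xs kw index).map (fun p => [p.1, p.2])) := by
    funext acc index
    rw [PySem.List.foldl_append_singleton_eq_map, PySem.List.foldl_append_singleton_eq_map]
    simp [chunk, List.map_map, Function.comp_def, List.append_assoc]
  rw [hbody, PySem.List.foldl_append_eq_flatMap, List.nil_append]

-- ===== VERDICT (by name: the statement is the Claim_ definition above) =====
theorem getCollocationsFromSentence_new_spec : Claim_equal_getCollocationsFromSentence_new := by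
  intro xs kw _
  unfold Spec_getCollocationsFromSentence_new
  -- the keyword positions
  have hidx := indexList_spec kw xs [] 0
  -- A side
  have hA : getCollocationsFromSentence_new xs kw
      = (((((PySem.List.enumerate xs 0).filter (fun p => p.2 == kw)).map (·.1)).flatMap
            (chunk xs kw)).foldl (fun s p => dedupStepA s [p.1, p.2]) ([], [])) := by
    simp only [getCollocationsFromSentence_new, filterCollocations]
    rw [hidx]
    simp only [List.nil_append]
    rw [allfeat_eq xs kw]
    rw [← List.map_flatMap, List.foldl_map]
  -- B side
  have hB : getCollocationsFromSentence_new_alt xs kw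
      = (((((PySem.List.enumerate xs 0).filter (fun p => p.2 == kw)).map (·.1)).flatMap
            (chunk xs kw)).foldl bstep (PySem.Set.empty, [], [])).2 := by
    simp only [getCollocationsFromSentence_new_alt]
    rw [foldl_guard ((PySem.List.enumerate xs 0)) (fun iw => iw.2 == kw) (fun iw => iw.1)
      (fun t i => (PySem.List.pyRange (-4) 4 1).foldl (offStepB xs kw (xs.length : Int) i) t)]
    rw [foldl_flatMap]
    congr 1
    apply PySem.List.foldl_congr_mem
    intro t i hi
    obtain ⟨p, hp, rfl⟩ := List.mem_map.1 hi
    have hpf := (List.mem_filter.1 hp).1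
    obtain ⟨k, hk, rfl⟩ := (PySem.List.mem_enumerate_iff _ _ _).1 hpf
    exact offsets_chunk xs kw _ (by simp) (by simp; omega) t
  rw [hA, hB]
  exact (fuse _ PySem.Set.empty ([], []) (fun x y => rfl)).symm
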